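-- pv_equiv track=rewrite | github.com/RohitPatil18/Data-Structure-Algorithm-Practice | python/recursion/problem14.py | check
-- ===== SOURCE A (Python) =====
-- def check(n):
--   res = n // 3
--   rem = n % 3
--   if rem != 0 or res < 3:
--     return False
--   elif res == 3:
--     return True
--   return check(res)
-- ===== SOURCE B (Python) =====
-- def check(n):
--     # True iff n is a power of 3 that is at least 9: strip factors of 3, see if 1 remains.
--     if n < 9:
--         return False
--     while n % 3 == 0:
--         n //= 3
--     return n == 1
-- ===== Notes on version B (the rewrite author's own statement) =====
-- stated objective: simpler
-- what changed: Replaced the tail recursion that inspects n//3 and n%3 at each level by an early n<9 test plus a loop that strips all factors of 3 and checks whether 1 remains.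
import Mathlib
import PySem

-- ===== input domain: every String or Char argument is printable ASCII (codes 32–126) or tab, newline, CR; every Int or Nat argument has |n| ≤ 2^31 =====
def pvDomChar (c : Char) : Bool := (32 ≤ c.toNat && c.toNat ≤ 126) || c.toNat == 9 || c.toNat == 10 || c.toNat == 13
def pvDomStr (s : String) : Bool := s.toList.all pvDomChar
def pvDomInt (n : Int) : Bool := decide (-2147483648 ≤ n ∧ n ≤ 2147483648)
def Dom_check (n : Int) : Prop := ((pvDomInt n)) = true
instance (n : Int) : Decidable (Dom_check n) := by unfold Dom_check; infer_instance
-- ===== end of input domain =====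

-- B replaces A's tail recursion by a strip-factors-of-3 loop: return n >= 9 and the 3-free part of n is 1 (objective: simpler).


-- ===== PORT A =====
def check (n : Int) : Bool :=
  let res := PySem.Int.floordiv n 3
  let rem := PySem.Int.mod n 3
  if rem ≠ 0 ∨ res < 3 then false
  else if res = 3 then true
  else check res
termination_by n.toNat
decreasing_by
  rename_i h1 _
  rw [not_or, not_lt] at h1
  have hadd := PySem.Int.floordiv_mul_add_mod n 3
  omega

-- ===== PORT B =====
-- the '1 ≤ n' conjunct is only a totality guard: B runs its loop only after the n < 9 test, so n ≥ 9 > 0 there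
def stripThrees (n : Int) : Int :=
  if PySem.Int.mod n 3 = 0 ∧ 1 ≤ n then stripThrees (PySem.Int.floordiv n 3) else n
termination_by n.toNat
decreasing_by
  rename_i h1
  have hadd := PySem.Int.floordiv_mul_add_mod n 3
  omega

def check_alt (n : Int) : Bool :=
  if n < 9 then false else stripThrees n == 1

-- ===== PRECONDITION & SPEC =====
def Spec_check (n : Int) (out : Bool) : Prop := out = check_alt n
instance (n : Int) (out : Bool) : Decidable (Spec_check n out) := by unfold Spec_check; infer_instance

-- ===== CLAIM (what is proved, stated in full; the proofs are below) =====
def Claim_equal_check : Prop := ∀ (n : Int), Dom_check n → Spec_check n (check n)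

-- ===== LEMMAS AND PROOFS =====

lemma check_unfold (n : Int) :
    check n = if PySem.Int.mod n 3 ≠ 0 ∨ PySem.Int.floordiv n 3 < 3 then false
      else if PySem.Int.floordiv n 3 = 3 then true
      else check (PySem.Int.floordiv n 3) := by
  rw [check]

lemma strip_of_not_dvd {n : Int} (h : PySem.Int.mod n 3 ≠ 0) : stripThrees n = n := by
  rw [stripThrees, if_neg (fun hc => h hc.1)]

lemma strip_mul3 {m : Int} (hm : 1 ≤ m) : stripThrees (3 * m) = stripThrees m := by
  have hmod : PySem.Int.mod (3 * m) 3 = 0 := (PySem.Int.mod_eq_zero_iff_dvd _ _).mpr ⟨m, rfl⟩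
  have hdiv : PySem.Int.floordiv (3 * m) 3 = m := by
    rw [PySem.Int.floordiv_eq_ediv_of_pos (by norm_num)]
    omega
  rw [stripThrees, if_pos ⟨hmod, by omega⟩, hdiv]

lemma check_lt9 {n : Int} (h : n < 9) : check n = false := by
  rw [check_unfold]
  by_cases hm : PySem.Int.mod n 3 = 0
  · have hlt : PySem.Int.floordiv n 3 < 3 := by
      rw [PySem.Int.floordiv_lt_iff_lt_mul (by norm_num)]; omega
    rw [if_pos (Or.inr hlt)]
  · rw [if_pos (Or.inl hm)]

lemma strip_small : ∀ m : Int, 4 ≤ m → m < 9 → stripThrees m ≠ 1 := by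
  intro m h4 h9
  interval_cases m <;>
    · rw [stripThrees]
      norm_num [PySem.Int.mod, PySem.Int.floordiv, Int.fmod, Int.fdiv, Int.emod, Int.ediv]
      try (rw [strip_of_not_dvd (by decide)]; decide)

lemma strip_nine : stripThrees 9 = 1 := by
  rw [stripThrees, if_pos (by decide)]
  rw [stripThrees, if_pos (by decide)]
  rw [strip_of_not_dvd (by decide)]
  decide

lemma check_eq_alt : ∀ (k : Nat) (n : Int), n.toNat ≤ k → check n = check_alt n := by
  intro k
  induction k with
  | zero =>
    intro n hn
    have h9 : n < 9 := by omega
    rw [check_lt9 h9]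
    simp [check_alt, h9]
  | succ k ih =>
    intro n hn
    by_cases h9 : n < 9
    · rw [check_lt9 h9]; simp [check_alt, h9]
    · rw [not_lt] at h9
      have hadd := PySem.Int.floordiv_mul_add_mod n 3
      by_cases hm : PySem.Int.mod n 3 = 0
      · set res := PySem.Int.floordiv n 3 with hres
        have hne : n = 3 * res := by omega
        have hres3 : 3 ≤ res := by omega
        by_cases heq : res = 3
        · have hn9 : n = 9 := by omega
          subst hn9
          rw [check_unfold, if_neg (by rw [← hres, heq]; omega), if_pos heq]
          simp [check_alt, strip_nine]
        · have hres4 : 4 ≤ res := by omega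
          have hstep : check n = check res := by
            rw [check_unfold, ← hres, if_neg (by omega), if_neg heq]
          rw [hstep, ih res (by omega)]
          have hstrip : stripThrees n = stripThrees res := by
            rw [hne]; exact strip_mul3 (by omega)
          by_cases hr9 : res < 9
          · simp [check_alt, hr9, hstrip, strip_small res hres4 hr9]
          · simp [check_alt, hr9, hstrip]
            exact fun _ => h9
      · have hA : check n = false := by rw [check_unfold, if_pos (Or.inl hm)]
        have hB : check_alt n = false := by
          simp [check_alt, strip_of_not_dvd hm]
          intro _; omega
        rw [hA, hB]

-- ===== VERDICT (by name: the statement is the Claim_ definition above) =====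
theorem check_spec : Claim_equal_check := by
  intro n _
  unfold Spec_check
  exact check_eq_alt n.toNat n le_rfl
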